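-- pv_equiv track=rewrite | github.com/Adixtin/DataMatrix-generator | app/matrix.py | calculate_layout_rectangular
-- ===== SOURCE A (Python) =====
-- def calculate_layout_rectangular(data_length):
--     sizes = [16, 7, 28, 11, 24, 14, 32, 18, 32, 24, 44, 28]
--     layout_index = -1
--     num_cols = 1
--
--     while True:
--         layout_index += 1
--         width = sizes[layout_index]
--         height = 6 + (layout_index & 12)
--         block_capacity = width * height // 8
--
--         layout_index += 1
--         if block_capacity - sizes[layout_index] >= data_length:
--             break
--
--     if width > 25:
--         num_cols = 2
--
--     return width, height, layout_index, 1, num_cols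
-- ===== SOURCE B (Python) =====
-- _THRESHOLDS = [5, 10, 16, 22, 32, 49]
-- _LAYOUTS = [
--     (16, 6, 1, 1, 1),
--     (28, 6, 3, 1, 2),
--     (24, 10, 5, 1, 1),
--     (32, 10, 7, 1, 2),
--     (32, 14, 9, 1, 2),
--     (44, 14, 11, 1, 2),
-- ]
--
-- def calculate_layout_rectangular(data_length):
--     # binary search for the first capacity threshold >= data_length
--     lo, hi = 0, len(_THRESHOLDS)
--     while lo < hi:
--         mid = (lo + hi) // 2
--         if _THRESHOLDS[mid] < data_length:
--             lo = mid + 1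
--         else:
--             hi = mid
--     return _LAYOUTS[lo]
-- ===== Notes on version B (the rewrite author's own statement) =====
-- stated objective: idiomatic
-- what changed: Replaces the sequential while-loop over an interleaved width/overhead array with bit-arithmetic heights by a binary search over a precomputed table of capacity thresholds paired with the six layout tuples.
import Mathlib
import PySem

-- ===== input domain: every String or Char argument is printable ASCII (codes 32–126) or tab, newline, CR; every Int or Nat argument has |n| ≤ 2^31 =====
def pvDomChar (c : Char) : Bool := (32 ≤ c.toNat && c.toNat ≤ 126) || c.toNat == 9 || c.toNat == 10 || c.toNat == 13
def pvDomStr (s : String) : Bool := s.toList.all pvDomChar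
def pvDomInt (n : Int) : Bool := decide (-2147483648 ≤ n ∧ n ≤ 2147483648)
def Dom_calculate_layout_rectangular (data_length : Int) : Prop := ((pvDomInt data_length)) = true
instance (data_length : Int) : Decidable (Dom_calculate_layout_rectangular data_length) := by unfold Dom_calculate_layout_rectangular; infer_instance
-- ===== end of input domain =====

-- B replaces A's sequential scan (interleaved sizes array, bit-arithmetic heights) by a
-- binary search over a precomputed threshold/layout table; equal cost on 6 entries (idiomatic).

-- ===== PORT A =====
-- the 'while True' loop of A: layout_index advances by 2 each round; fuel 7 exceeds the
-- longest possible run before sizes[layout_index] goes out of range (IndexError → none).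
def pvALoop (sizes : List Int) (data_length : Int) (layout_index : Int) : Nat → Option (Int × Int × Int)
  | 0 => none
  | fuel + 1 =>
    let li := layout_index + 1
    match PySem.List.pyGet? sizes li with
    | none => none
    | some width =>
      let height : Int := 6 + Int.land li 12
      let block_capacity := PySem.Int.floordiv (width * height) 8
      let li2 := li + 1
      match PySem.List.pyGet? sizes li2 with
      | none => none
      | some s =>
        if block_capacity - s ≥ data_length then some (width, height, li2)
        else pvALoop sizes data_length li2 fuel

def calculate_layout_rectangular (data_length : Int) : Int × Int × Int × Int × Int :=
  let sizes : List Int := [16, 7, 28, 11, 24, 14, 32, 18, 32, 24, 44, 28]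
  match pvALoop sizes data_length (-1) 7 with
  | some (width, height, layout_index) =>
      (width, height, layout_index, 1, if width > 25 then 2 else 1)
  | none => (0, 0, 0, 0, 0)   -- IndexError: outside Pre_

-- ===== PORT B =====
def pvThresholds : List Int := [5, 10, 16, 22, 32, 49]
def pvLayouts : List (Int × Int × Int × Int × Int) :=
  [(16, 6, 1, 1, 1), (28, 6, 3, 1, 2), (24, 10, 5, 1, 1),
   (32, 10, 7, 1, 2), (32, 14, 9, 1, 2), (44, 14, 11, 1, 2)]

-- the 'while lo < hi' binary search of B; hi - lo halves each round, fuel 8 is ample.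
def pvBSearch (x : Int) (lo hi : Int) : Nat → Int
  | 0 => lo
  | fuel + 1 =>
    if lo < hi then
      let mid := PySem.Int.floordiv (lo + hi) 2
      match PySem.List.pyGet? pvThresholds mid with
      | none => lo   -- unreachable: mid is in range while lo < hi
      | some t => if t < x then pvBSearch x (mid + 1) hi fuel else pvBSearch x lo mid fuel
    else lo

def calculate_layout_rectangular_alt (data_length : Int) : Int × Int × Int × Int × Int :=
  match PySem.List.pyGet? pvLayouts (pvBSearch data_length 0 6 8) with
  | some t => t
  | none => (0, 0, 0, 0, 0)   -- IndexError: outside Pre_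

-- ===== PRECONDITION & SPEC =====
-- Excluded: inputs above the largest capacity threshold, where A raises IndexError walking
-- off the sizes list (and B's table lookup raises too); A returns on all admitted inputs.
def Pre_calculate_layout_rectangular (data_length : Int) : Prop := data_length ≤ 49
instance (data_length : Int) : Decidable (Pre_calculate_layout_rectangular data_length) := by
  unfold Pre_calculate_layout_rectangular; infer_instance
def pvWitness_calculate_layout_rectangular : Int := 12

def Spec_calculate_layout_rectangular (data_length : Int) (out : Int × Int × Int × Int × Int) : Prop := out = calculate_layout_rectangular_alt data_length
instance (data_length : Int) (out : Int × Int × Int × Int × Int) : Decidable (Spec_calculate_layout_rectangular data_length out) := by unfold Spec_calculate_layout_rectangular; infer_instance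

-- ===== CLAIM (what is proved, stated in full; the proofs are below) =====
def Claim_equal_calculate_layout_rectangular : Prop := ∀ (data_length : Int), Dom_calculate_layout_rectangular data_length → Pre_calculate_layout_rectangular data_length → Spec_calculate_layout_rectangular data_length (calculate_layout_rectangular data_length)

-- ===== LEMMAS AND PROOFS =====
lemma pvA_eval (n : Int) (h : n ≤ 49) :
    calculate_layout_rectangular n =
      if n ≤ 5 then (16, 6, 1, 1, 1)
      else if n ≤ 10 then (28, 6, 3, 1, 2)
      else if n ≤ 16 then (24, 10, 5, 1, 1)
      else if n ≤ 22 then (32, 10, 7, 1, 2)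
      else if n ≤ 32 then (32, 14, 9, 1, 2)
      else (44, 14, 11, 1, 2) := by
  simp [calculate_layout_rectangular, pvALoop, PySem.List.pyGet?, PySem.List.pyIdx?,
    PySem.Int.floordiv, Int.land]
  split_ifs <;> first | rfl | omega

lemma pvB_eval (n : Int) (h : n ≤ 49) :
    calculate_layout_rectangular_alt n =
      if n ≤ 5 then (16, 6, 1, 1, 1)
      else if n ≤ 10 then (28, 6, 3, 1, 2)
      else if n ≤ 16 then (24, 10, 5, 1, 1)
      else if n ≤ 22 then (32, 10, 7, 1, 2)
      else if n ≤ 32 then (32, 14, 9, 1, 2)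
      else (44, 14, 11, 1, 2) := by
  simp [calculate_layout_rectangular_alt, pvBSearch, pvThresholds, pvLayouts,
    PySem.List.pyGet?, PySem.List.pyIdx?, PySem.Int.floordiv]
  split_ifs <;> first | rfl | omega

-- ===== VERDICT (by name: the statement is the Claim_ definition above) =====
theorem calculate_layout_rectangular_spec : Claim_equal_calculate_layout_rectangular := by
  intro n _ hpre
  unfold Spec_calculate_layout_rectangular
  rw [pvA_eval n hpre, pvB_eval n hpre]
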